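-- pv_equiv track=rewrite | github.com/leeal111/lora-for-continual-learning | utils.py | argv_str
-- ===== SOURCE A (Python) =====
-- def argv_str(argv):
--     exlusion_list = ["--result_path", "--gpus", "--workers_num"]
--     add_flag = True
--     new_list = []
--     for item in argv:
--         if item.startswith("--") and item not in exlusion_list:
--             add_flag = True
--         if item in exlusion_list:
--             add_flag = False
--         if add_flag:
--             new_list.append(item)
--     return "_".join(new_list).replace("-", "")
-- ===== SOURCE B (Python) =====
-- def argv_str(argv):
--     exclusion = ["--result_path", "--gpus", "--workers_num"]
--     # partition into consecutive groups, a new group at every "--" flag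
--     groups = [[]]
--     for item in argv:
--         if item.startswith("--"):
--             groups.append([])
--         groups[-1].append(item)
--     kept = [g for g in groups if g and g[0] not in exclusion]
--     flat = [x for g in kept for x in g]
--     return "_".join(flat).replace("-", "")
-- ===== Notes on version B (the rewrite author's own statement) =====
-- stated objective: simpler
-- what changed: Replaces the running add_flag state machine with a group-and-filter pass: argv is partitioned into consecutive groups starting at each '--' flag, groups whose leading flag is excluded are dropped, and the rest are flattened and joined.
import Mathlib
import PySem

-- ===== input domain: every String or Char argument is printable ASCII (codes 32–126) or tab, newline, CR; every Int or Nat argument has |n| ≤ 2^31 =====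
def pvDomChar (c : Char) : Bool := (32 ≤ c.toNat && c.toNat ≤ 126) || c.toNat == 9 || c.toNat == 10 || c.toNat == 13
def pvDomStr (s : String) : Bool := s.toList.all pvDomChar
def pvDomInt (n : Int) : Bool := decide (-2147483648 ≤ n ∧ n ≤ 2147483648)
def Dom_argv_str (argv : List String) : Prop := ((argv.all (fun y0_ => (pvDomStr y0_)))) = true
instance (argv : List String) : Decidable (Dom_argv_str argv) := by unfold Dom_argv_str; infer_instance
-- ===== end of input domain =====

-- B replaces A's running add_flag state machine by partitioning argv into flag-led groups,
-- filtering out groups led by an excluded flag, and flattening (simpler decomposition).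

def pvExl : List String := ["--result_path", "--gpus", "--workers_num"]

-- ===== PORT A =====
-- one loop step of A: update add_flag, then conditionally append item
def pvStepA (s : Bool × List String) (item : String) : Bool × List String :=
  let f1 := if PySem.Str.startswith item "--" && !(pvExl.contains item) then true else s.1
  let f2 := if pvExl.contains item then false else f1
  (f2, if f2 then s.2 ++ [item] else s.2)

def argv_str (argv : List String) : String :=
  PySem.Str.replace (PySem.Str.join "_" (argv.foldl pvStepA (true, [])).2) "-" ""

-- ===== PORT B =====
-- one loop step of B: start a new group at each "--" flag, else extend the current group
-- (state is the group list reversed, head = current group; Python's groups[-1].append)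
def pvStepB (gs : List (List String)) (item : String) : List (List String) :=
  let gs' := if PySem.Str.startswith item "--" then [] :: gs else gs
  match gs' with
  | g :: rest => (g ++ [item]) :: rest
  | [] => [[item]]                         -- unreachable: the fold starts from [[]]

-- 'g and g[0] not in exclusion'
def pvKept (g : List String) : Bool :=
  match g with
  | [] => false
  | h :: _ => !(pvExl.contains h)

def argv_str_alt (argv : List String) : String :=
  PySem.Str.replace
    (PySem.Str.join "_" (((argv.foldl pvStepB [[]]).reverse.filter pvKept).flatten)) "-" ""

-- ===== PRECONDITION & SPEC =====
def Spec_argv_str (argv : List String) (out : String) : Prop := out = argv_str_alt argv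
instance (argv : List String) (out : String) : Decidable (Spec_argv_str argv out) := by unfold Spec_argv_str; infer_instance

-- ===== CLAIM (what is proved, stated in full; the proofs are below) =====
def Claim_equal_argv_str : Prop := ∀ (argv : List String), Dom_argv_str argv → Spec_argv_str argv (argv_str argv)

-- ===== LEMMAS AND PROOFS =====

-- every excluded string starts with "--"
lemma exl_startswith {x : String} (h : pvExl.contains x = true) :
    PySem.Str.startswith x "--" = true := by
  simp [pvExl] at h
  rcases h with h | h | h <;> subst h <;> decide

-- flag value determined by the current group's head
def pvFlagOf (g : List String) : Bool :=
  match g with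
  | [] => true
  | h :: _ => !(pvExl.contains h)

lemma if_flag_eq (g : List String) :
    (if pvFlagOf g then g else []) = (if pvKept g then g else []) := by
  cases g <;> simp [pvFlagOf, pvKept]

-- the loop invariant: A's accumulator = flatten of the kept finished groups
-- plus the current group's items (if its flag is up)
lemma loop_inv (xs : List String) (acc gcur : List String) (don : List (List String))
    (hacc : acc = ((don.reverse.filter pvKept).flatten) ++ (if pvFlagOf gcur then gcur else [])) :
    (xs.foldl pvStepA (pvFlagOf gcur, acc)).2 =
      (((xs.foldl pvStepB (gcur :: don)).reverse).filter pvKept).flatten := by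
  induction xs generalizing acc gcur don with
  | nil =>
      rw [hacc, if_flag_eq gcur]
      cases h : pvKept gcur <;>
        simp [List.filter_append, h, List.foldl_nil]
  | cons x xs ih =>
      by_cases hs : PySem.Str.startswith x "--" = true
      · have hs' : PySem.Chars.startswith x.toList ['-', '-'] = true := by simpa using hs
        by_cases hc : x ∈ pvExl
        · have h1 : pvStepA (pvFlagOf gcur, acc) x = (pvFlagOf [x], acc) := by
            simp [pvStepA, pvFlagOf, hc]
          have h2 : pvStepB (gcur :: don) x = [x] :: gcur :: don := by
            simp [pvStepB, hs']
          rw [List.foldl_cons, List.foldl_cons, h1, h2,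
            ih acc [x] (gcur :: don) ?_]
          rw [hacc]
          simp only [List.reverse_cons, List.filter_append, List.flatten_append]
          rw [if_flag_eq gcur]
          simp [pvFlagOf, hc]
          cases hk : pvKept gcur <;> simp [hk]
        · have h1 : pvStepA (pvFlagOf gcur, acc) x = (pvFlagOf [x], acc ++ [x]) := by
            simp [pvStepA, pvFlagOf, hs', hc]
          have h2 : pvStepB (gcur :: don) x = [x] :: gcur :: don := by
            simp [pvStepB, hs']
          rw [List.foldl_cons, List.foldl_cons, h1, h2,
            ih (acc ++ [x]) [x] (gcur :: don) ?_]
          rw [hacc]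
          simp only [List.reverse_cons, List.filter_append, List.flatten_append]
          rw [if_flag_eq gcur]
          simp [pvFlagOf, hc]
          cases hk : pvKept gcur <;> simp [hk]
      · have hs' : PySem.Chars.startswith x.toList ['-', '-'] = false := by
          simpa using hs
        have hc : x ∉ pvExl := fun h => by
          have := exl_startswith (x := x) (by simpa using h)
          exact hs this
        have hflag : pvFlagOf (gcur ++ [x]) = pvFlagOf gcur := by
          cases gcur <;> simp [pvFlagOf, hc]
        have h1 : pvStepA (pvFlagOf gcur, acc) x =
            (pvFlagOf (gcur ++ [x]),
              if pvFlagOf gcur then acc ++ [x] else acc) := by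
          simp [pvStepA, hs', hc, hflag]
        have h2 : pvStepB (gcur :: don) x = (gcur ++ [x]) :: don := by
          simp [pvStepB, hs']
        rw [List.foldl_cons, List.foldl_cons, h1, h2]
        cases hf : pvFlagOf gcur
        · simpa [hf] using ih acc (gcur ++ [x]) don
            (by simp [hacc, hflag, hf])
        · simpa [hf] using ih (acc ++ [x]) (gcur ++ [x]) don
            (by simp [hacc, hflag, hf])

-- ===== VERDICT (by name: the statement is the Claim_ definition above) =====
theorem argv_str_spec : Claim_equal_argv_str := by
  intro argv _
  unfold Spec_argv_str argv_str argv_str_alt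
  have h := loop_inv argv [] [] [] (by simp [pvFlagOf])
  simp only [pvFlagOf] at h
  rw [h]
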